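-- pv_equiv track=rewrite | github.com/meee-low/web-of-marvel-characters | utils/ComicSeries.py | format_to_url
-- ===== SOURCE A (Python) =====
-- def format_to_url(issue):
--     no_apostrophes = issue.replace("'", "%27") #replaces apostrophes
--     no_spaces = no_apostrophes.replace(" ", "_") #replace spaces with underscores
--
--
--     #remove special characters from url
--     allowed_characters = "_/:.-?%&()"
--     relative_url = "".join(c for c in no_spaces if c.isalnum() or c in allowed_characters)
--
--     marvel_wiki_url = "https://marvel.fandom.com/wiki/"
--     full_url = marvel_wiki_url + relative_url #prepend marvel_wiki_url
--     return full_url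
-- ===== SOURCE B (Python) =====
-- def format_to_url(issue):
--     parts = []
--     for c in issue:
--         if c == "'":
--             parts.append("%27")
--         elif c == " ":
--             parts.append("_")
--         elif c.isalnum() or c in "_/:.-?%&()":
--             parts.append(c)
--     return "https://marvel.fandom.com/wiki/" + "".join(parts)
-- ===== Notes on version B (the rewrite author's own statement) =====
-- stated objective: alternative
-- what changed: Replaces A's three sequential passes (two .replace calls building intermediate strings plus a filtering join) with one single forward scan that emits each character's URL fragment (apostrophe and space substitutions, kept allowed characters) directly.
import Mathlib
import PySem

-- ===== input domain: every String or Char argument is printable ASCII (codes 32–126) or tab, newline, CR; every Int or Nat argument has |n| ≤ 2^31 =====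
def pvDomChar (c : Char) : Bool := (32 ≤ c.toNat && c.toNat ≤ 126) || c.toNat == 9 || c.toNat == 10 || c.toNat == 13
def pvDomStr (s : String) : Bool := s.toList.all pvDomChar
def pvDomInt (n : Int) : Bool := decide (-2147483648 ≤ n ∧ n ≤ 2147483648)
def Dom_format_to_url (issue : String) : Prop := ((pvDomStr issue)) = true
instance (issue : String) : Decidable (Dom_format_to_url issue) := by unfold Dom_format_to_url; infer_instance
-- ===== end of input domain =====

-- B replaces A's three sequential passes (two .replace calls plus a filtering join) by one
-- single forward scan over the original string that emits each character's URL fragment directly.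

-- ===== PORT A =====
def format_to_url (issue : String) : String :=
  let noApostrophes := PySem.Chars.replace issue.toList "'".toList "%27".toList
  let noSpaces := PySem.Chars.replace noApostrophes " ".toList "_".toList
  let allowedCharacters := "_/:.-?%&()".toList
  let relativeUrl := PySem.Chars.join "".toList
    ((noSpaces.filter (fun c => PySem.Chars.isalnum c || PySem.Chars.isIn [c] allowedCharacters)).map
      (fun c => [c]))
  let marvelWikiUrl := "https://marvel.fandom.com/wiki/".toList
  let fullUrl := marvelWikiUrl ++ relativeUrl
  String.ofList fullUrl

-- ===== PORT B =====
def format_to_url_alt (issue : String) : String :=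
  let parts := issue.toList.foldl (fun acc c =>
      if c = '\'' then acc ++ ["%27".toList]
      else if c = ' ' then acc ++ ["_".toList]
      else if PySem.Chars.isalnum c || PySem.Chars.isIn [c] "_/:.-?%&()".toList then acc ++ [[c]]
      else acc) []
  String.ofList ("https://marvel.fandom.com/wiki/".toList ++ PySem.Chars.join "".toList parts)

-- ===== PRECONDITION & SPEC =====
def Spec_format_to_url (issue : String) (out : String) : Prop := out = format_to_url_alt issue
instance (issue : String) (out : String) : Decidable (Spec_format_to_url issue out) := by unfold Spec_format_to_url; infer_instance

-- ===== CLAIM (what is proved, stated in full; the proofs are below) =====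
def Claim_equal_format_to_url : Prop := ∀ (issue : String), Dom_format_to_url issue → Spec_format_to_url issue (format_to_url issue)

-- ===== LEMMAS AND PROOFS =====

-- the character class A's comprehension keeps
def pvKeep (c : Char) : Bool :=
  PySem.Chars.isalnum c || PySem.Chars.isIn [c] "_/:.-?%&()".toList

-- what B emits for one input character
def pvEmit (c : Char) : List Char :=
  if c = '\'' then "%27".toList
  else if c = ' ' then "_".toList
  else if pvKeep c then [c] else []

-- replace with a single-character pattern is a flatMap (proved from replace.go's recursion)
lemma pv_go_single (a : Char) (new : List Char) :
    ∀ (l : List Char) (fuel : Nat) (acc : List Char), l.length ≤ fuel →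
      PySem.Chars.replace.go [a] new fuel l acc
        = acc.reverse ++ l.flatMap (fun x => if x = a then new else [x]) := by
  intro l
  induction l with
  | nil =>
      intro fuel acc _
      cases fuel <;> simp [PySem.Chars.replace.go]
  | cons c t ih =>
      intro fuel acc hle
      cases fuel with
      | zero => simp at hle
      | succ fuel =>
          by_cases hca : c = a
          · subst hca
            have hstep : PySem.Chars.replace.go [c] new (fuel + 1) (c :: t) acc
                = PySem.Chars.replace.go [c] new fuel t (new.reverse ++ acc) := by
              simp [PySem.Chars.replace.go, List.isPrefixOf]
            rw [hstep, ih fuel (new.reverse ++ acc) (by simpa using hle)]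
            simp
          · have hstep : PySem.Chars.replace.go [a] new (fuel + 1) (c :: t) acc
                = PySem.Chars.replace.go [a] new fuel t (c :: acc) := by
              simp [PySem.Chars.replace.go, List.isPrefixOf, Ne.symm hca]
            rw [hstep, ih fuel (c :: acc) (by simpa using hle)]
            simp [hca]

lemma pv_replace_single (cs : List Char) (a : Char) (new : List Char) :
    PySem.Chars.replace cs [a] new = cs.flatMap (fun x => if x = a then new else [x]) := by
  simpa [PySem.Chars.replace] using pv_go_single a new cs cs.length [] (le_refl _)

-- joining with the empty separator is flatten
lemma pv_join_nil : ∀ (parts : List (List Char)), PySem.Chars.join [] parts = parts.flatten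
  | [] => PySem.Chars.join_nil []
  | [x] => by rw [PySem.Chars.join_singleton]; simp
  | x :: y :: ys => by
      rw [PySem.Chars.join_cons_cons, pv_join_nil (y :: ys)]
      simp

-- mapping to singletons and flattening is the identity
lemma pv_flatten_singletons (l : List Char) : (l.map (fun c => [c])).flatten = l := by
  induction l with
  | nil => rfl
  | cons c t ih => simp [ih]

-- one character of A's three-pass pipeline produces exactly B's emission
lemma pv_char_step (x : Char) :
    (((if x = '\'' then "%27".toList else [x]).flatMap
        (fun y => if y = ' ' then "_".toList else [y])).filter pvKeep) = pvEmit x := by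
  by_cases h1 : x = '\''
  · subst h1; decide
  · by_cases h2 : x = ' '
    · subst h2; decide
    · cases hpk : pvKeep x <;> simp [h1, h2, pvEmit, List.filter, hpk]

-- A's whole pipeline (replace, replace, filter) as a single flatMap of pvEmit
lemma pv_chain (cs : List Char) :
    (((cs.flatMap (fun x => if x = '\'' then "%27".toList else [x])).flatMap
        (fun y => if y = ' ' then "_".toList else [y])).filter pvKeep) = cs.flatMap pvEmit := by
  induction cs with
  | nil => simp
  | cons c t ih =>
      simp only [List.flatMap_cons, List.flatMap_append, List.filter_append, ih, pv_char_step c]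

-- B's accumulating loop flattens to the same flatMap of pvEmit
lemma pv_fold_flatten (cs : List Char) (acc : List (List Char)) :
    (cs.foldl (fun acc c =>
      if c = '\'' then acc ++ ["%27".toList]
      else if c = ' ' then acc ++ ["_".toList]
      else if PySem.Chars.isalnum c || PySem.Chars.isIn [c] "_/:.-?%&()".toList then acc ++ [[c]]
      else acc) acc).flatten = acc.flatten ++ cs.flatMap pvEmit := by
  induction cs generalizing acc with
  | nil => simp
  | cons c t ih =>
      rw [List.foldl_cons, ih, List.flatMap_cons, ← List.append_assoc]
      congr 1
      by_cases h1 : c = '\''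
      · simp [h1, pvEmit]
      · by_cases h2 : c = ' '
        · simp [h2, pvEmit]
        · simp only [if_neg h1, if_neg h2, pvEmit, pvKeep]
          split_ifs with h3 <;> simp

-- ===== VERDICT (by name: the statement is the Claim_ definition above) =====
theorem format_to_url_spec : Claim_equal_format_to_url := by
  intro issue _
  show format_to_url issue = format_to_url_alt issue
  have hq : (fun c => PySem.Chars.isalnum c || PySem.Chars.isIn [c] "_/:.-?%&()".toList) = pvKeep := rfl
  have h0 : ("" : String).toList = ([] : List Char) := rfl
  have hA : ("'" : String).toList = ['\''] := rfl
  have hS : (" " : String).toList = [' '] := rfl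
  simp only [format_to_url, format_to_url_alt, h0, hA, hS, hq, pv_replace_single,
    pv_join_nil, pv_flatten_singletons, pv_fold_flatten, pv_chain,
    List.flatten_nil, List.nil_append]
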